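-- pv_equiv track=rewrite | github.com/AileenXie/leetcode | written-examination/0506pdd2020/03.py | func
-- ===== SOURCE A (Python) =====
-- def func(a,b,n):
--     dp=[0,a,b]
--     for i in range(1,n):
--         dp[0],dp[1]=dp[1],dp[2]
--         dp[2]=dp[0]+dp[1]
--     if dp[2]%3:
--         return "NO"
--     else:
--         return "YES"
-- ===== SOURCE B (Python) =====
-- _FIB3 = [0, 1, 1, 2, 0, 2, 2, 1]  # Fibonacci mod 3, Pisano period 8
--
-- def func(a, b, n):
--     # term(n) = a*F(m-1) + b*F(m) with m = max(n,1); only its value mod 3 matters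
--     m = n if n > 1 else 1
--     val = (a * _FIB3[(m - 1) % 8] + b * _FIB3[m % 8]) % 3
--     return "YES" if val == 0 else "NO"
-- ===== Notes on version B (the rewrite author's own statement) =====
-- stated objective: faster
-- what changed: Replaces the O(n) Fibonacci-style loop by an O(1) closed form: the term mod 3 is a*F(m-1)+b*F(m) mod 3, with Fibonacci mod 3 read from its Pisano-period-8 table.
import Mathlib
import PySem

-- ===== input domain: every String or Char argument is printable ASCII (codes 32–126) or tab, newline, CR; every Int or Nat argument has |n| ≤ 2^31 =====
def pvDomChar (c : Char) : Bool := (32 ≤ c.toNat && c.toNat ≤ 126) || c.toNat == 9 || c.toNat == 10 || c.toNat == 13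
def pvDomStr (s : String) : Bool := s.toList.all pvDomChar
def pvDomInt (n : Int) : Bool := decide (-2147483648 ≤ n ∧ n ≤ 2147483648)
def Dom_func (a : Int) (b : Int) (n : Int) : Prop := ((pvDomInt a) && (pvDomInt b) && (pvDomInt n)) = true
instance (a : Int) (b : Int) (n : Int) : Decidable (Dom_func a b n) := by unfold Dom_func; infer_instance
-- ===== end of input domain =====

-- B replaces A's O(n) Fibonacci-style loop by an O(1) Pisano-period-8 table lookup of the term mod 3.

-- ===== PORT A =====
-- dp is a fixed 3-element list; ported as a triple (dp0, dp1, dp2), updated exactly as A does.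
def func (a : Int) (b : Int) (n : Int) : String :=
  -- dp after the loop (dp[2] is .2.2)
  if PySem.Int.mod ((PySem.List.pyRange 1 n 1).foldl
      (fun (dp : Int × Int × Int) _ => (dp.2.1, dp.2.2, dp.2.1 + dp.2.2)) (0, a, b)).2.2 3 ≠ 0
  then "NO" else "YES"

-- ===== PORT B =====
def fib3 : List Int := [0, 1, 1, 2, 0, 2, 2, 1]  -- Fibonacci mod 3, Pisano period 8

-- m = max(n,1); indices (m-1)%8 and m%8 are always in [0,8), so the lookups never raise
def func_alt (a : Int) (b : Int) (n : Int) : String :=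
  if PySem.Int.mod
      (a * PySem.List.pyGetD fib3 (PySem.Int.mod ((if n > 1 then n else 1) - 1) 8) 0
        + b * PySem.List.pyGetD fib3 (PySem.Int.mod (if n > 1 then n else 1) 8) 0) 3 == 0
  then "YES" else "NO"

-- ===== PRECONDITION & SPEC =====
def Spec_func (a : Int) (b : Int) (n : Int) (out : String) : Prop := out = func_alt a b n
instance (a : Int) (b : Int) (n : Int) (out : String) : Decidable (Spec_func a b n out) := by unfold Spec_func; infer_instance

-- ===== CLAIM (what is proved, stated in full; the proofs are below) =====
def Claim_equal_func : Prop := ∀ (a : Int) (b : Int) (n : Int), Dom_func a b n → Spec_func a b n (func a b n)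

-- ===== LEMMAS AND PROOFS =====

-- coefficient sequences: dp2 after k steps = a * cseq (k+1) + b * dseq (k+1)
def cseq : Nat → Int
  | 0 => 1
  | 1 => 0
  | (k+2) => cseq k + cseq (k+1)

def dseq : Nat → Int
  | 0 => 0
  | 1 => 1
  | (k+2) => dseq k + dseq (k+1)

def stepf (dp : Int × Int × Int) : Int × Int × Int := (dp.2.1, dp.2.2, dp.2.1 + dp.2.2)

theorem foldl_const_step (l : List Int) (s : Int × Int × Int) :
    l.foldl (fun dp _ => stepf dp) s = stepf^[l.length] s := by
  induction l generalizing s with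
  | nil => rfl
  | cons x xs ih => simp [List.foldl, ih, Function.iterate_succ_apply]

theorem iterate_stepf (a b : Int) (k : Nat) :
    (stepf^[k] (0, a, b)).2.1 = a * cseq k + b * dseq k ∧
    (stepf^[k] (0, a, b)).2.2 = a * cseq (k+1) + b * dseq (k+1) := by
  induction k with
  | zero => simp [cseq, dseq]
  | succ k ih =>
    rcases ih with ⟨h1, h2⟩
    constructor <;>
      simp [Function.iterate_succ_apply', stepf, h1, h2, cseq, dseq] <;> ring

theorem cseq_period (k : Nat) : Int.ModEq 3 (cseq (k + 8)) (cseq k) ∧ Int.ModEq 3 (cseq (k + 9)) (cseq (k + 1)) := by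
  induction k with
  | zero => exact ⟨by decide, by decide⟩
  | succ k ih =>
    refine ⟨ih.2, ?_⟩
    have h10 : cseq (k + 10) = cseq (k + 8) + cseq (k + 9) := by
      show cseq (k + 8 + 2) = _; rw [cseq]
    have h2 : cseq (k + 2) = cseq k + cseq (k + 1) := by rw [cseq]
    rw [show k + 1 + 9 = k + 10 by omega, h10, show k + 1 + 1 = k + 2 by omega, h2]
    exact ih.1.add ih.2

theorem dseq_period (k : Nat) : Int.ModEq 3 (dseq (k + 8)) (dseq k) ∧ Int.ModEq 3 (dseq (k + 9)) (dseq (k + 1)) := by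
  induction k with
  | zero => exact ⟨by decide, by decide⟩
  | succ k ih =>
    refine ⟨ih.2, ?_⟩
    have h10 : dseq (k + 10) = dseq (k + 8) + dseq (k + 9) := by
      show dseq (k + 8 + 2) = _; rw [dseq]
    have h2 : dseq (k + 2) = dseq k + dseq (k + 1) := by rw [dseq]
    rw [show k + 1 + 9 = k + 10 by omega, h10, show k + 1 + 1 = k + 2 by omega, h2]
    exact ih.1.add ih.2

theorem cseq_mod_reduce (q r : Nat) : Int.ModEq 3 (cseq (8 * q + r)) (cseq r) := by
  induction q with
  | zero => simp
  | succ q ih =>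
    have : 8 * (q + 1) + r = (8 * q + r) + 8 := by omega
    rw [this]
    exact ((cseq_period (8 * q + r)).1).trans ih

theorem dseq_mod_reduce (q r : Nat) : Int.ModEq 3 (dseq (8 * q + r)) (dseq r) := by
  induction q with
  | zero => simp
  | succ q ih =>
    have : 8 * (q + 1) + r = (8 * q + r) + 8 := by omega
    rw [this]
    exact ((dseq_period (8 * q + r)).1).trans ih

theorem cseq_mod (k : Nat) : Int.ModEq 3 (cseq k) (cseq (k % 8)) := by
  have h := cseq_mod_reduce (k / 8) (k % 8)
  rwa [(by omega : 8 * (k / 8) + k % 8 = k)] at h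

theorem dseq_mod (k : Nat) : Int.ModEq 3 (dseq k) (dseq (k % 8)) := by
  have := dseq_mod_reduce (k / 8) (k % 8)
  rwa [(by omega : 8 * (k / 8) + k % 8 = k)] at this

-- cseq (r+1) mod 3 = fib3[r], dseq (r+1) mod 3 = fib3[(r+1)%8], for r < 8 — used pointwise below

-- ===== VERDICT (by name: the statement is the Claim_ definition above) =====
theorem table_c (r : Nat) (hr : r < 8) :
    Int.ModEq 3 (cseq ((r + 1) % 8)) (fib3.getD r 0) := by
  interval_cases r <;> decide

theorem table_d (r : Nat) (hr : r < 8) :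
    Int.ModEq 3 (dseq ((r + 1) % 8)) (fib3.getD ((r + 1) % 8) 0) := by
  interval_cases r <;> decide

theorem func_spec : Claim_equal_func := by
  intro a b n _
  unfold Spec_func func func_alt
  set k := (n - 1).toNat with hk
  -- A's loop runs k times
  have hlen : (PySem.List.pyRange 1 n 1).length = k := PySem.List.length_pyRange_one 1 n
  have hfold : (PySem.List.pyRange 1 n 1).foldl
      (fun (dp : Int × Int × Int) _ => (dp.2.1, dp.2.2, dp.2.1 + dp.2.2)) (0, a, b)
      = stepf^[k] (0, a, b) := by
    rw [← hlen]
    exact foldl_const_step (PySem.List.pyRange 1 n 1) (0, a, b)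
  have hA : ((PySem.List.pyRange 1 n 1).foldl
      (fun (dp : Int × Int × Int) _ => (dp.2.1, dp.2.2, dp.2.1 + dp.2.2)) (0, a, b)).2.2
      = a * cseq (k + 1) + b * dseq (k + 1) := by
    rw [hfold]; exact (iterate_stepf a b k).2
  -- B's m equals k + 1
  have hm : (if n > 1 then n else 1) = (k : Int) + 1 := by
    split <;> omega
  rw [hA, hm]
  have h8 : ((k : Int) + 1 - 1) = ((k : Int)) := by ring
  rw [h8]
  -- Python % on nonnegative arguments
  have hm1 : PySem.Int.mod (k : Int) 8 = ((k % 8 : Nat) : Int) := by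
    rw [PySem.Int.mod_eq_emod_of_pos (by norm_num)]
    push_cast; rfl
  have hm2 : PySem.Int.mod ((k : Int) + 1) 8 = (((k + 1) % 8 : Nat) : Int) := by
    rw [PySem.Int.mod_eq_emod_of_pos (by norm_num)]
    push_cast; rfl
  rw [hm1, hm2, PySem.List.pyGetD_natCast, PySem.List.pyGetD_natCast]
  -- both selectors test the same residue
  have hrlt : k % 8 < 8 := Nat.mod_lt _ (by norm_num)
  have hkey : Int.ModEq 3 (a * cseq (k + 1) + b * dseq (k + 1))
      (a * fib3.getD (k % 8) 0 + b * fib3.getD ((k + 1) % 8) 0) := by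
    have hc : Int.ModEq 3 (cseq (k + 1)) (fib3.getD (k % 8) 0) := by
      have h1 : (k + 1) % 8 = (k % 8 + 1) % 8 := by omega
      exact (cseq_mod (k + 1)).trans (h1 ▸ table_c (k % 8) hrlt)
    have hd : Int.ModEq 3 (dseq (k + 1)) (fib3.getD ((k + 1) % 8) 0) := by
      have h1 : (k + 1) % 8 = (k % 8 + 1) % 8 := by omega
      exact (dseq_mod (k + 1)).trans (h1 ▸ table_d (k % 8) hrlt)
    exact (hc.mul_left a).add (hd.mul_left b)
  have hmodeq : PySem.Int.mod (a * cseq (k + 1) + b * dseq (k + 1)) 3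
      = PySem.Int.mod (a * fib3.getD (k % 8) 0 + b * fib3.getD ((k + 1) % 8) 0) 3 := by
    rw [PySem.Int.mod_eq_emod_of_pos (by norm_num), PySem.Int.mod_eq_emod_of_pos (by norm_num)]
    exact hkey
  rw [hmodeq]
  by_cases h : PySem.Int.mod (a * fib3.getD (k % 8) 0 + b * fib3.getD ((k + 1) % 8) 0) 3 = 0 <;>
    simp [h]
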